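-- pv_equiv track=rewrite | github.com/Henoru/gobang | ai02.py | calc
-- ===== SOURCE A (Python) =====
-- def calc(typ,lst):
--   #连五 10000000
--   #活：(4,10000) (3,1000) (2,100) (1,10)
--   scr=(1,10,100,1000,10000,10000000)
--   #死：(4,1000) (3,100) (2,10) (1,1)
--   EMPTY=0
--   t=3-typ
--   num=0
--   ans=0
--   for x in lst:
--     if x!=typ:
--       if num>=5:
--         ans=ans+scr[5]
--       elif num==0:
--         None
--       elif t==EMPTY and x==EMPTY: #活分
--         ans=ans+scr[num]
--       elif t==EMPTY or x==EMPTY: #死分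
--         ans=ans+scr[num-1]
--       t=x
--       num=0
--     else:
--       num=num+1
--   if num>=5:
--     ans=ans+scr[5]
--   elif num!=0 and t==EMPTY:
--     ans=ans+scr[num-1]
--   return ans
-- ===== SOURCE B (Python) =====
-- def run_score(prev, nxt, n):
--     scr = (1, 10, 100, 1000, 10000, 10000000)
--     if n >= 5:
--         return scr[5]
--     if prev == 0 and nxt == 0:
--         return scr[n]
--     if prev == 0 or nxt == 0:
--         return scr[n - 1]
--     return 0
--
-- def calc(typ, lst):
--     # phase 1: run-length encode the line
--     runs = []
--     for x in lst:
--         if runs and runs[-1][0] == x: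
--             runs[-1] = (x, runs[-1][1] + 1)
--         else:
--             runs.append((x, 1))
--     # phase 2: score each run of our colour from its two neighbouring run
--     # values; the left border counts as the opponent wall 3-typ, the right
--     # border as a non-empty wall (-1)
--     ans = 0
--     prev = 3 - typ
--     nxts = [v for v, _ in runs[1:]] + [-1]
--     for (v, n), nxt in zip(runs, nxts):
--         if v == typ:
--             ans += run_score(prev, nxt, n)
--         prev = v
--     return ans
-- ===== Notes on version B (the rewrite author's own statement) =====
-- stated objective: alternative
-- what changed: Replaces A's single stateful scan (carrying previous cell, current run count and running score, with a duplicated end-of-loop flush) by a two-phase decomposition: first run-length encode the line, then score each run of the colour from its two neighbouring run values with the borders as non-empty walls.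
import Mathlib
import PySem

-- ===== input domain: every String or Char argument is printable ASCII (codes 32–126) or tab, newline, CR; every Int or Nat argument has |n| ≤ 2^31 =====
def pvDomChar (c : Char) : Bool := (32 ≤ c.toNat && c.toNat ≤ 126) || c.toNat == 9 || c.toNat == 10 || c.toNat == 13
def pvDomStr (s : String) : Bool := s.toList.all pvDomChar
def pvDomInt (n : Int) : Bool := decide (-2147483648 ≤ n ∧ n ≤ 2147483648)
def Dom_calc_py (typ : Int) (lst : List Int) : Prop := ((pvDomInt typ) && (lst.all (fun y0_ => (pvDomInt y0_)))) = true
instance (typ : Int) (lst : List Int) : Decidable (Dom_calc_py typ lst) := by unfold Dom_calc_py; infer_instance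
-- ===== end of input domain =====

-- B replaces A's single stateful scan by a two-phase decomposition (run-length
-- encode, then score each run of the colour from its neighbouring run values);
-- objective: alternative (same O(n) cost, different structure).

-- shared score table: scr = (1,10,100,1000,10000,10000000); indices are always in range
def scrGet (i : Int) : Int :=
  (PySem.List.pyGet? [1, 10, 100, 1000, 10000, 10000000] i).getD 0

-- ===== PORT A =====
-- loop body of A; state is (t, num, ans)
def calcStep (typ : Int) (st : Int × Int × Int) (x : Int) : Int × Int × Int :=
  match st with
  | (t, num, ans) =>
    if x ≠ typ then
      let ans' :=
        if num ≥ 5 then ans + scrGet 5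
        else if num = 0 then ans
        else if t = 0 ∧ x = 0 then ans + scrGet num
        else if t = 0 ∨ x = 0 then ans + scrGet (num - 1)
        else ans
      (x, 0, ans')
    else (t, num + 1, ans)

-- A's flush after the loop
def calcEnd (st : Int × Int × Int) : Int :=
  match st with
  | (t, num, ans) =>
    if num ≥ 5 then ans + scrGet 5
    else if num ≠ 0 ∧ t = 0 then ans + scrGet (num - 1)
    else ans

def calc_py (typ : Int) (lst : List Int) : Int :=
  calcEnd (lst.foldl (calcStep typ) (3 - typ, 0, 0))

-- ===== PORT B =====
-- phase 1 of B: one step of the run-length encoding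
def rleStep (runs : List (Int × Int)) (x : Int) : List (Int × Int) :=
  match runs.getLast? with
  | some (v, n) => if v = x then runs.dropLast ++ [(v, n + 1)] else runs ++ [(x, 1)]
  | none => [(x, 1)]

-- B's helper run_score
def runScore (prev nxt n : Int) : Int :=
  if n ≥ 5 then scrGet 5
  else if prev = 0 ∧ nxt = 0 then scrGet n
  else if prev = 0 ∨ nxt = 0 then scrGet (n - 1)
  else 0

-- phase 2 of B: loop body over zip(runs, nxts); state is (prev, ans)
def scoreStep (typ : Int) (st : Int × Int) (p : (Int × Int) × Int) : Int × Int :=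
  match st, p with
  | (prev, ans), ((v, n), nxt) =>
    (v, if v = typ then ans + runScore prev nxt n else ans)

def calc_py_alt (typ : Int) (lst : List Int) : Int :=
  let runs := lst.foldl rleStep []
  let nxts := runs.tail.map Prod.fst ++ [-1]
  ((runs.zip nxts).foldl (scoreStep typ) (3 - typ, 0)).2

-- ===== PRECONDITION & SPEC =====
def Spec_calc_py (typ : Int) (lst : List Int) (out : Int) : Prop := out = calc_py_alt typ lst
instance (typ : Int) (lst : List Int) (out : Int) : Decidable (Spec_calc_py typ lst out) := by unfold Spec_calc_py; infer_instance

-- ===== CLAIM (what is proved, stated in full; the proofs are below) =====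
def Claim_equal_calc_py : Prop := ∀ (typ : Int) (lst : List Int), Dom_calc_py typ lst → Spec_calc_py typ lst (calc_py typ lst)

-- ===== LEMMAS AND PROOFS =====

-- a run (v, n) denotes n copies of v
def rep (p : Int × Int) : List Int := List.replicate p.2.toNat p.1

-- the rle output: adjacent runs have distinct values, all lengths ≥ 1
def GoodRuns (runs : List (Int × Int)) : Prop :=
  (runs.map Prod.fst).IsChain (· ≠ ·) ∧ ∀ p ∈ runs, 1 ≤ p.2

-- rep of a run of positive length, first element peeled off
lemma rep_cons (v n : Int) (hn : 1 ≤ n) :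
    rep (v, n) = v :: List.replicate (n - 1).toNat v := by
  have h1 : n.toNat = (n - 1).toNat + 1 := by omega
  show List.replicate n.toNat v = _
  rw [h1, List.replicate_succ]

-- common reference: score of a run list, carrying the previous run's value
def S (typ prev : Int) : List (Int × Int) → Int
  | [] => 0
  | (v, n) :: rest =>
    (if v = typ then runScore prev (match rest with | [] => -1 | (w, _) :: _ => w) n else 0)
      + S typ v rest

lemma rleStep_pres (runs : List (Int × Int)) (x : Int) (h : GoodRuns runs) :
    GoodRuns (rleStep runs x) ∧ (rleStep runs x).flatMap rep = runs.flatMap rep ++ [x] := by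
  cases runs using List.reverseRecOn with
  | nil =>
      refine ⟨⟨by simp [rleStep], by simp [rleStep]⟩, by simp [rleStep, rep]⟩
  | append_singleton rs p =>
      obtain ⟨v, n⟩ := p
      have hn : 1 ≤ n := h.2 (v, n) (by simp)
      by_cases hvx : v = x
      · subst hvx
        have hstep : rleStep (rs ++ [(v, n)]) v = rs ++ [(v, n + 1)] := by
          simp [rleStep]
        constructor
        · constructor
          · have : (rs ++ [(v, n + 1)]).map Prod.fst = (rs ++ [(v, n)]).map Prod.fst := by
              simp
            rw [hstep, this]; exact h.1
          · intro p hp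
            rw [hstep] at hp
            rcases List.mem_append.mp hp with hp | hp
            · exact h.2 p (List.mem_append.mpr (Or.inl hp))
            · simp at hp; subst hp; omega
        · have hrep : rep (v, n + 1) = rep (v, n) ++ [v] := by
            have : (n + 1).toNat = n.toNat + 1 := by omega
            simp [rep, this, List.replicate_succ']
          rw [hstep]
          simp [hrep]
      · have hstep : rleStep (rs ++ [(v, n)]) x = (rs ++ [(v, n)]) ++ [(x, 1)] := by
          simp [rleStep, hvx]
        constructor
        · constructor
          · rw [hstep, List.map_append]
            refine List.IsChain.append h.1 (by simp) ?_
            intro a ha b hb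
            simp at ha hb
            omega
          · intro p hp
            rcases List.mem_append.mp (hstep ▸ hp) with hp | hp
            · exact h.2 p hp
            · simp at hp; subst hp; omega
        · rw [hstep]
          simp [rep]

lemma rle_spec (lst : List Int) :
    GoodRuns (lst.foldl rleStep []) ∧ (lst.foldl rleStep []).flatMap rep = lst := by
  induction lst using List.reverseRecOn with
  | nil => exact ⟨⟨by simp, by simp⟩, rfl⟩
  | append_singleton ys x ih =>
    rw [List.foldl_append, List.foldl_cons, List.foldl_nil]
    exact ⟨(rleStep_pres _ x ih.1).1, by rw [(rleStep_pres _ x ih.1).2, ih.2]⟩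

lemma fold_rep_typ (typ t num ans : Int) (k : Nat) :
    List.foldl (calcStep typ) (t, num, ans) (List.replicate k typ) = (t, num + (k : Int), ans) := by
  induction k generalizing num with
  | zero => simp
  | succ k ih =>
      rw [List.replicate_succ, List.foldl_cons]
      have : calcStep typ (t, num, ans) typ = (t, num + 1, ans) := by simp [calcStep]
      rw [this, ih]
      congr 2
      push_cast; ring

lemma fold_rep_same (typ v ans : Int) (hv : v ≠ typ) (k : Nat) :
    List.foldl (calcStep typ) (v, 0, ans) (List.replicate k v) = (v, 0, ans) := by
  induction k with
  | zero => simp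
  | succ k ih =>
      rw [List.replicate_succ, List.foldl_cons]
      have : calcStep typ ((v : Int), (0 : Int), ans) v = (v, 0, ans) := by
        simp [calcStep, hv]
      rw [this, ih]

lemma step_flush (typ t n ans x : Int) (hx : x ≠ typ) (hn : 1 ≤ n) :
    calcStep typ (t, n, ans) x = (x, 0, ans + runScore t x n) := by
  simp only [calcStep, runScore, hx, ne_eq, not_false_eq_true, if_pos]
  split_ifs <;> simp_all

lemma calcEnd_last (t n ans : Int) (hn : 1 ≤ n) :
    calcEnd (t, n, ans) = ans + runScore t (-1) n := by
  simp only [calcEnd, runScore]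
  split_ifs <;> simp_all

lemma step_zero (typ t ans x : Int) (hx : x ≠ typ) :
    calcStep typ (t, 0, ans) x = (x, 0, ans) := by
  simp [calcStep, hx]

lemma A_runs (typ : Int) (runs : List (Int × Int)) (h : GoodRuns runs) :
    ∀ (t ans : Int),
      calcEnd (List.foldl (calcStep typ) (t, 0, ans) (runs.flatMap rep)) = ans + S typ t runs := by
  induction runs with
  | nil => intro t ans; simp [calcEnd, S]
  | cons p rest ih =>
      obtain ⟨v, n⟩ := p
      have hn : 1 ≤ n := h.2 (v, n) (by simp)
      have hrest : GoodRuns rest :=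
        ⟨(by simpa using h.1.tail), fun p hp => h.2 p (List.mem_cons_of_mem _ hp)⟩
      intro t ans
      rw [List.flatMap_cons, List.foldl_append]
      by_cases hv : v = typ
      · subst hv
        have hrepv : rep (v, n) = List.replicate n.toNat v := rfl
        have hcast : ((n.toNat : Int)) = n := Int.toNat_of_nonneg (by omega)
        rw [hrepv, fold_rep_typ, zero_add, hcast]
        cases rest with
        | nil =>
            rw [List.flatMap_nil, List.foldl_nil, calcEnd_last t n ans hn]
            simp [S]
        | cons q rest' =>
            obtain ⟨w, m⟩ := q
            have hvw : v ≠ w := by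
              have := h.1
              simp only [List.map_cons] at this
              exact (List.isChain_cons_cons.mp this).1
            have hw : w ≠ v := fun hc => hvw (hc.symm)
            have hm : 1 ≤ m := h.2 (w, m) (by simp)
            have hdec : List.flatMap rep ((w, m) :: rest')
                = w :: (List.replicate (m - 1).toNat w ++ List.flatMap rep rest') := by
              rw [List.flatMap_cons, rep_cons w m hm, List.cons_append]
            have e1 : List.foldl (calcStep v) (t, n, ans) (List.flatMap rep ((w, m) :: rest'))
                = List.foldl (calcStep v) (w, 0, ans + runScore t w n)
                    (List.flatMap rep rest') := by
              rw [hdec, List.foldl_cons, step_flush v t n ans w hw hn,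
                List.foldl_append, fold_rep_same v w _ hw]
            have e2 : List.foldl (calcStep v) (w, 0, ans + runScore t w n)
                  (List.flatMap rep ((w, m) :: rest'))
                = List.foldl (calcStep v) (w, 0, ans + runScore t w n)
                    (List.flatMap rep rest') := by
              rw [hdec, List.foldl_cons, step_zero v w _ w hw,
                List.foldl_append, fold_rep_same v w _ hw]
            rw [e1, ← e2, ih hrest w (ans + runScore t w n)]
            simp [S, hw]
            ring
      · rw [rep_cons v n hn, List.foldl_cons, step_zero typ t ans v hv,
          fold_rep_same typ v ans hv, ih hrest v ans]
        simp [S, hv]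

lemma B_runs (typ : Int) (runs : List (Int × Int)) :
    ∀ (prev ans : Int),
      (List.foldl (scoreStep typ) (prev, ans)
        (runs.zip (runs.tail.map Prod.fst ++ [-1]))).2 = ans + S typ prev runs := by
  induction runs with
  | nil => simp [S]
  | cons p rest ih =>
      obtain ⟨v, n⟩ := p
      intro prev ans
      cases rest with
      | nil =>
          simp only [List.tail_cons, List.map_nil, List.nil_append, List.zip_cons_cons,
            List.zip_nil_left, List.foldl_cons, List.foldl_nil, scoreStep, S]
          split_ifs <;> ring
      | cons q rest' =>
          obtain ⟨w, m⟩ := q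
          simp only [List.tail_cons, List.map_cons, List.cons_append, List.zip_cons_cons,
            List.foldl_cons, scoreStep]
          rw [show ((w, m) :: rest' : List (Int × Int)).zip (rest'.map Prod.fst ++ [-1])
                = ((w, m) :: rest').zip (((w, m) :: rest').tail.map Prod.fst ++ [-1]) by simp,
            ih]
          simp only [S]
          split_ifs <;> ring

-- ===== VERDICT (by name: the statement is the Claim_ definition above) =====
theorem calc_py_spec : Claim_equal_calc_py := by
  intro typ lst _
  unfold Spec_calc_py calc_py calc_py_alt
  obtain ⟨hg, hflat⟩ := rle_spec lst
  conv_lhs => rw [← hflat]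
  rw [A_runs typ _ hg, B_runs]
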